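-- pv_equiv track=rewrite | github.com/dlvql/Algorithm | 프로그래머스/0/120843. 공 던지기/공 던지기.py | solution
-- ===== SOURCE A (Python) =====
-- def solution(numbers, k):
--     l = len(numbers)
--     idx = 0
--     for i in range(k - 1):
--         idx += 2
--         if(idx >= l):
--             idx -= l
--         # idx += 2 if (idx + 2) < len(numbers) else (2 - len(numbers))
--     return numbers[idx]
-- ===== SOURCE B (Python) =====
-- def solution(numbers, k):
--     steps = max(k - 1, 0)
--     return numbers[(2 * steps) % len(numbers)]
-- ===== Notes on version B (the rewrite author's own statement) =====
-- stated objective: simpler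
-- what changed: Replaces A's step-by-step passing loop (idx += 2 with a conditional wrap, k-1 iterations) by the closed-form modular index numbers[(2*max(k-1,0)) % len(numbers)].
import Mathlib
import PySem

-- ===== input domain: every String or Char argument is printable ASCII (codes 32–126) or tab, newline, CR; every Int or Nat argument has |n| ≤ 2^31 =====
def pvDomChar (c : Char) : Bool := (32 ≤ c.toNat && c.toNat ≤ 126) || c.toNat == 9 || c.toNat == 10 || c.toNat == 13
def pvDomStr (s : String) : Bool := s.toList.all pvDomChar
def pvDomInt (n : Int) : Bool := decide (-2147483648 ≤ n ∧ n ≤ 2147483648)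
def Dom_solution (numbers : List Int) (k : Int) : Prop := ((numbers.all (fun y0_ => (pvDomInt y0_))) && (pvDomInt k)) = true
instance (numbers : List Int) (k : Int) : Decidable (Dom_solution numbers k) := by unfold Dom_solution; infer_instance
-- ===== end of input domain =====

-- B replaces A's step-by-step passing loop by the closed-form modular index
-- numbers[(2*max(k-1,0)) % len(numbers)] (objective: simpler).

-- ===== PORT A =====
def solution (numbers : List Int) (k : Int) : Int :=
  let l : Int := numbers.length
  let idx : Int :=
    (PySem.List.pyRange 0 (k - 1) 1).foldl
      (fun idx _ =>
        let idx := idx + 2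
        if idx ≥ l then idx - l else idx) 0
  (PySem.List.pyGet? numbers idx).getD 0

-- ===== PORT B =====
def solution_alt (numbers : List Int) (k : Int) : Int :=
  let steps : Int := max (k - 1) 0
  (PySem.List.pyGet? numbers (PySem.Int.mod (2 * steps) (numbers.length : Int))).getD 0

-- ===== PRECONDITION & SPEC =====
-- Pre_ excludes exactly the inputs where A raises IndexError: the empty list (always),
-- and a one-element list with k ≥ 2 (A's single subtraction leaves idx = k-1 ≥ 1).
def Pre_solution (numbers : List Int) (k : Int) : Prop :=
  1 ≤ numbers.length ∧ (2 ≤ numbers.length ∨ k ≤ 1)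
instance (numbers : List Int) (k : Int) : Decidable (Pre_solution numbers k) := by
  unfold Pre_solution; infer_instance
def pvWitness_solution : List Int × Int := ([1, 2, 3, 4], 5)

def Spec_solution (numbers : List Int) (k : Int) (out : Int) : Prop := out = solution_alt numbers k
instance (numbers : List Int) (k : Int) (out : Int) : Decidable (Spec_solution numbers k out) := by
  unfold Spec_solution; infer_instance

-- ===== CLAIM (what is proved, stated in full; the proofs are below) =====
def Claim_equal_solution : Prop := ∀ (numbers : List Int) (k : Int), Dom_solution numbers k → Pre_solution numbers k → Spec_solution numbers k (solution numbers k)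

-- ===== LEMMAS AND PROOFS =====

-- a foldl whose function ignores the list elements is an iterate
theorem foldl_const_iterate {α β : Type} (g : α → α) (L : List β) (x : α) :
    L.foldl (fun a _ => g a) x = g^[L.length] x := by
  induction L generalizing x with
  | nil => rfl
  | cons h t ih => simp [List.foldl_cons, ih, Function.iterate_succ_apply]

-- the loop body, iterated n times from a reduced residue, is the modular closed form (needs l ≥ 2)
theorem iterate_step_eq (l : Int) (hl : 2 ≤ l) :
    ∀ (n : Nat) (idx : Int), 0 ≤ idx → idx < l →
      (fun idx : Int => let idx := idx + 2; if idx ≥ l then idx - l else idx)^[n] idx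
        = (idx + 2 * n) % l := by
  intro n
  induction n with
  | zero =>
    intro idx h0 h1
    simp [Int.emod_eq_of_lt h0 h1]
  | succ n ih =>
    intro idx h0 h1
    have hstep : (if idx + 2 ≥ l then idx + 2 - l else idx + 2) = (idx + 2) % l := by
      split_ifs with h
      · rw [← Int.sub_emod_right]
        exact (Int.emod_eq_of_lt (by omega) (by omega)).symm
      · exact (Int.emod_eq_of_lt (by omega) (by omega)).symm
    have hr0 : 0 ≤ (idx + 2) % l := Int.emod_nonneg _ (by omega)
    have hr1 : (idx + 2) % l < l := Int.emod_lt_of_pos _ (by omega)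
    rw [Function.iterate_succ_apply]
    show (fun idx : Int => let idx := idx + 2; if idx ≥ l then idx - l else idx)^[n]
        (if idx + 2 ≥ l then idx + 2 - l else idx + 2) = _
    rw [hstep, ih _ hr0 hr1, Int.emod_add_emod]
    congr 1
    push_cast
    ring

theorem solution_spec : Claim_equal_solution := by
  intro numbers k _ hpre
  obtain ⟨h1, h2⟩ := hpre
  unfold Spec_solution
  simp only [solution, solution_alt]
  have hl0 : 0 < (numbers.length : Int) := by exact_mod_cast h1
  rw [foldl_const_iterate, PySem.List.length_pyRange_one,
      PySem.Int.mod_eq_emod_of_pos hl0]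
  by_cases hk : k ≤ 1
  · have hn : (k - 1 - 0).toNat = 0 := by omega
    have hm : max (k - 1) 0 = 0 := by omega
    rw [hn, hm]
    simp [Int.emod_eq_of_lt le_rfl hl0]
  · have hl2 : (2 : Int) ≤ (numbers.length : Int) := by
      rcases h2 with h | h
      · exact_mod_cast h
      · omega
    rw [iterate_step_eq _ hl2 _ 0 le_rfl hl0]
    have harg : (0 + 2 * ((k - 1 - 0).toNat : Int)) = 2 * max (k - 1) 0 := by omega
    rw [harg]
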